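-- pv_equiv track=rewrite | github.com/eardrummer/AutomaticChordEstimation | modules/utils.py | segmentByOnsets
-- ===== SOURCE A (Python) =====
-- def segmentByOnsets(onset_boundaries, minAudioLength):
-- 	"""
-- 	Description:
-- 		This function takes a list of sample numbers that represents onset occurences in the audio and returns tuples
-- 		[[start Segment, end Segment],...]
-- 		 where each segment of audio between onsets starts and ends. It ignores segments of less than minAudioLength Samples
--
-- 	Parameters:
-- 		minAudioLength is in Samples (Obtain as minAudioLength = minimumTimeinSeconds * sampleRate)
--
-- 	"""
--
-- 	audioSegmentBoundaries = []
-- 	k = 0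
--
-- 	while k < (len(onset_boundaries) - 1):
--
-- 		start_boundary = onset_boundaries[k]
-- 		# Skip onset boundaries that are less than minAudioLength Samples away from previous onset boundary
-- 		while onset_boundaries[k+1] - onset_boundaries[k] < minAudioLength:
-- 			k += 1
-- 			if k == len(onset_boundaries)-1:
-- 				k -= 1
-- 				break
--
-- 		end_boundary = onset_boundaries[k+1]
--
-- 		segment = [start_boundary, end_boundary]
-- 		audioSegmentBoundaries.append(segment)
--
-- 		k += 1
--
-- 	return audioSegmentBoundaries
-- ===== SOURCE B (Python) =====
-- def segmentByOnsets(onset_boundaries, minAudioLength):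
--     n = len(onset_boundaries)
--     if n < 2:
--         return []
--     breaks = [0] + [i + 1 for i in range(n - 1)
--                     if onset_boundaries[i + 1] - onset_boundaries[i] >= minAudioLength]
--     if breaks[-1] != n - 1:
--         breaks.append(n - 1)
--     return [[onset_boundaries[a], onset_boundaries[b]]
--             for a, b in zip(breaks, breaks[1:])]
-- ===== Notes on version B (the rewrite author's own statement) =====
-- stated objective: alternative
-- what changed: Replaced the nested pointer-advancing while loops with a two-phase decomposition: first build a breakpoint-index table (0, every index after a gap >= minAudioLength, and the last index), then emit segments by zipping adjacent breakpoints.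
import Mathlib
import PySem

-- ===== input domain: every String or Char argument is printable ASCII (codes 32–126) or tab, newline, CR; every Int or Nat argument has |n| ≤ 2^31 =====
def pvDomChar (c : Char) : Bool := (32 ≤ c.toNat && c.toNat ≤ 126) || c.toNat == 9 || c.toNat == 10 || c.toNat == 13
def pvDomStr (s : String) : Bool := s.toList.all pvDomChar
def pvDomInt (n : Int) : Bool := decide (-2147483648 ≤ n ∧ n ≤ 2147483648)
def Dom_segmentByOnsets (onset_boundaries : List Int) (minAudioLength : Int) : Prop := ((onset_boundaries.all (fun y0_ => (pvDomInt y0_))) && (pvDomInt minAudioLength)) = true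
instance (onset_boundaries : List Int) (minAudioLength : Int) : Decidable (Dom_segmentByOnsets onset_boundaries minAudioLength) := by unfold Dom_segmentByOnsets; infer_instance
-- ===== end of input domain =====

-- B replaces A's nested pointer-advancing while loops with a breakpoint-index table
-- paired by adjacent zipping (alternative decomposition, same O(n) cost).


-- ===== PORT A =====
-- Inner `while onset[k+1]-onset[k] < minAudioLength` loop of A; the loop invariant
-- keeps every index in range, so `List.getD _ 0` coincides with Python indexing here.
-- The fuel argument is only a totality device (xs.length is always enough fuel).
def segInnerA (xs : List Int) (m : Int) : Nat → Nat → Nat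
  | 0, k => k
  | fuel + 1, k =>
    if xs.getD (k + 1) 0 - xs.getD k 0 < m then
      -- k += 1; if k == len-1: k -= 1; break
      if k + 1 = xs.length - 1 then (k + 1) - 1
      else segInnerA xs m fuel (k + 1)
    else k

-- Outer `while k < len(onset_boundaries) - 1` loop of A.
def segOuterA (xs : List Int) (m : Int) : Nat → Nat → List (List Int) → List (List Int)
  | 0, _, acc => acc
  | fuel + 1, k, acc =>
    if k < xs.length - 1 then
      -- start = onset[k]; k2 = result of the inner skip loop; stop = onset[k2+1]
      segOuterA xs m fuel (segInnerA xs m xs.length k + 1)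
        (acc ++ [[xs.getD k 0, xs.getD (segInnerA xs m xs.length k + 1) 0]])
    else acc

def segmentByOnsets (onset_boundaries : List Int) (minAudioLength : Int) : List (List Int) :=
  segOuterA onset_boundaries minAudioLength onset_boundaries.length 0 []

-- ===== PORT B =====
def segmentByOnsets_alt (onset_boundaries : List Int) (minAudioLength : Int) : List (List Int) :=
  let n := onset_boundaries.length
  if n < 2 then []
  else
    let breaks0 : List Nat :=
      0 :: (((List.range (n - 1)).filter
              (fun i => minAudioLength ≤ onset_boundaries.getD (i + 1) 0 - onset_boundaries.getD i 0)).map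
            (fun i => i + 1))
    let breaks : List Nat := if breaks0.getLast? = some (n - 1) then breaks0 else breaks0 ++ [n - 1]
    (breaks.zip breaks.tail).map
      (fun p => [onset_boundaries.getD p.1 0, onset_boundaries.getD p.2 0])

-- ===== PRECONDITION & SPEC =====
def Spec_segmentByOnsets (onset_boundaries : List Int) (minAudioLength : Int) (out : List (List Int)) : Prop := out = segmentByOnsets_alt onset_boundaries minAudioLength
instance (onset_boundaries : List Int) (minAudioLength : Int) (out : List (List Int)) : Decidable (Spec_segmentByOnsets onset_boundaries minAudioLength out) := by unfold Spec_segmentByOnsets; infer_instance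

-- ===== CLAIM (what is proved, stated in full; the proofs are below) =====
def Claim_equal_segmentByOnsets : Prop := ∀ (onset_boundaries : List Int) (minAudioLength : Int), Dom_segmentByOnsets onset_boundaries minAudioLength → Spec_segmentByOnsets onset_boundaries minAudioLength (segmentByOnsets onset_boundaries minAudioLength)

-- ===== LEMMAS AND PROOFS =====

-- `cutK xs m k` = the ascending list of all breakpoints `i+1` with `k ≤ i ≤ n-2`
-- and gap at i at least m.
def cutK (xs : List Int) (m : Int) (k : Nat) : List Nat :=
  if _h : k < xs.length - 1 then
    (if m ≤ xs.getD (k + 1) 0 - xs.getD k 0 then [k + 1] else []) ++ cutK xs m (k + 1)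
  else []
termination_by xs.length - 1 - k
decreasing_by omega

def withEnd (n : Nat) (l : List Nat) : List Nat :=
  if l.getLast? = some (n - 1) then l else l ++ [n - 1]

def segPairs (xs : List Int) (bs : List Nat) : List (List Int) :=
  (bs.zip bs.tail).map (fun p => [xs.getD p.1 0, xs.getD p.2 0])

theorem cutK_eq_filter (xs : List Int) (m : Int) (k : Nat) :
    cutK xs m k =
      ((List.range' k (xs.length - 1 - k)).filter
          (fun i => decide (m ≤ xs.getD (i + 1) 0 - xs.getD i 0))).map (fun i => i + 1) := by
  by_cases h : k < xs.length - 1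
  · have hd : xs.length - 1 - k = (xs.length - 1 - (k + 1)) + 1 := by omega
    rw [cutK, dif_pos h, cutK_eq_filter xs m (k + 1), hd, List.range'_succ, List.filter_cons]
    split_ifs <;> simp_all
    omega
  · have : xs.length - 1 - k = 0 := by omega
    rw [cutK, dif_neg h, this]
    simp
termination_by xs.length - 1 - k
decreasing_by omega

theorem cutK_mem (xs : List Int) (m : Int) (k : Nat) :
    ∀ j ∈ cutK xs m k, k + 1 ≤ j ∧ j ≤ xs.length - 1 := by
  by_cases h : k < xs.length - 1
  · intro j hj
    rw [cutK, dif_pos h] at hj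
    rcases List.mem_append.mp hj with hj | hj
    · by_cases hc : m ≤ xs.getD (k + 1) 0 - xs.getD k 0
      · rw [if_pos hc] at hj
        simp at hj
        omega
      · rw [if_neg hc] at hj
        simp at hj
    · have := cutK_mem xs m (k + 1) j hj
      omega
  · intro j hj
    rw [cutK, dif_neg h] at hj
    simp at hj
termination_by xs.length - 1 - k
decreasing_by omega

theorem cutK_tail (xs : List Int) (m : Int) (k : Nat) :
    ∀ j t, cutK xs m k = j :: t → t = cutK xs m j := by
  by_cases h : k < xs.length - 1
  · intro j t hjt
    rw [cutK, dif_pos h] at hjt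
    by_cases hc : m ≤ xs.getD (k + 1) 0 - xs.getD k 0
    · rw [if_pos hc] at hjt
      simp at hjt
      obtain ⟨hj, ht⟩ := hjt
      rw [← hj]
      exact ht.symm
    · rw [if_neg hc] at hjt
      simp at hjt
      exact cutK_tail xs m (k + 1) j t hjt
  · intro j t hjt
    rw [cutK, dif_neg h] at hjt
    simp at hjt
termination_by xs.length - 1 - k
decreasing_by omega

theorem segInnerA_eq (xs : List Int) (m : Int) :
    ∀ fuel k, k < xs.length - 1 → xs.length - 1 - k ≤ fuel →
      segInnerA xs m fuel k = (cutK xs m k).headD (xs.length - 1) - 1 := by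
  intro fuel
  induction fuel with
  | zero => intro k hk hf; omega
  | succ fv ih =>
    intro k hk _hf
    rw [segInnerA, cutK, dif_pos hk]
    by_cases hc : m ≤ xs.getD (k + 1) 0 - xs.getD k 0
    · rw [if_neg (by omega), if_pos hc]
      simp
    · rw [if_pos (by omega), if_neg hc]
      by_cases he : k + 1 = xs.length - 1
      · rw [if_pos he]
        have : cutK xs m (k + 1) = [] := by rw [cutK, dif_neg (by omega)]
        rw [this]
        simp
        omega
      · rw [if_neg he, ih (k + 1) (by omega) (by omega)]
        simp
  
theorem withEnd_cons (n : Nat) (x : Nat) (l : List Nat) (hx : x ≠ n - 1) :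
    withEnd n (x :: l) = x :: withEnd n l := by
  unfold withEnd
  cases l with
  | nil => simp [hx]
  | cons y t => simp [List.getLast?_cons_cons]; split <;> simp

theorem segPairs_cons (xs : List Int) (a b : Nat) (t : List Nat) :
    segPairs xs (a :: b :: t) = [xs.getD a 0, xs.getD b 0] :: segPairs xs (b :: t) := by
  simp [segPairs]

theorem segOuterA_stop (xs : List Int) (m : Int) (fuel k : Nat) (acc : List (List Int))
    (h : ¬ k < xs.length - 1) : segOuterA xs m fuel k acc = acc := by
  cases fuel with
  | zero => rfl
  | succ fv => rw [segOuterA, if_neg h]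

theorem segOuterA_eq (xs : List Int) (m : Int) :
    ∀ fuel k acc, k < xs.length - 1 → xs.length - 1 - k ≤ fuel →
      segOuterA xs m fuel k acc = acc ++ segPairs xs (k :: withEnd xs.length (cutK xs m k)) := by
  intro fuel
  induction fuel with
  | zero => intro k acc hk hf; omega
  | succ fv ih =>
    intro k acc hk hf
    rw [segOuterA, if_pos hk]
    have hinner := segInnerA_eq xs m xs.length k hk (by omega)
    cases hK : cutK xs m k with
    | nil =>
      rw [hK] at hinner
      simp at hinner
      have hstop : segInnerA xs m xs.length k + 1 = xs.length - 1 := by omega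
      rw [hinner] at hstop ⊢
      rw [hstop, segOuterA_stop xs m fv _ _ (by omega)]
      simp [withEnd, segPairs]
    | cons j t =>
      rw [hK] at hinner
      simp at hinner
      have hjmem := cutK_mem xs m k j (by rw [hK]; simp)
      have ht : t = cutK xs m j := cutK_tail xs m k j t hK
      have hstop : segInnerA xs m xs.length k + 1 = j := by omega
      rw [hstop]
      by_cases hj : j = xs.length - 1
      · have htnil : t = [] := by
          rw [ht, hj, cutK, dif_neg (by omega)]
        rw [segOuterA_stop xs m fv _ _ (by omega), htnil]
        simp [withEnd, hj, segPairs]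
      · rw [ih j _ (by omega) (by omega), withEnd_cons xs.length j t hj,
            segPairs_cons, ht]
        simp

theorem alt_eq_pairs (xs : List Int) (m : Int) (h : ¬ xs.length < 2) :
    segmentByOnsets_alt xs m = segPairs xs (0 :: withEnd xs.length (cutK xs m 0)) := by
  unfold segmentByOnsets_alt segPairs
  rw [if_neg h]
  have hK : cutK xs m 0 =
      ((List.range (xs.length - 1)).filter
          (fun i => decide (m ≤ xs.getD (i + 1) 0 - xs.getD i 0))).map (fun i => i + 1) := by
    rw [cutK_eq_filter]
    simp [List.range_eq_range']
  rw [← hK]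
  cases hc : cutK xs m 0 with
  | nil =>
    simp only [withEnd, List.getLast?_singleton]
    have h0 : (0 : Nat) ≠ xs.length - 1 := by omega
    simp [h0]
  | cons y t =>
    simp only [withEnd, List.getLast?_cons_cons]
    split <;> simp

theorem segmentByOnsets_eq (xs : List Int) (m : Int) :
    segmentByOnsets xs m = segmentByOnsets_alt xs m := by
  by_cases h : xs.length < 2
  · unfold segmentByOnsets segmentByOnsets_alt
    rw [if_pos h, segOuterA_stop xs m _ _ _ (by omega)]
  · unfold segmentByOnsets
    rw [segOuterA_eq xs m xs.length 0 [] (by omega) (by omega),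
        alt_eq_pairs xs m h]
    simp

-- ===== VERDICT (by name: the statement is the Claim_ definition above) =====
theorem segmentByOnsets_spec : Claim_equal_segmentByOnsets := by
  intro xs m _
  unfold Spec_segmentByOnsets
  exact segmentByOnsets_eq xs m
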